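-- pv_equiv track=rewrite | github.com/raeez/chiral-bar-cobar | compute/lib/cusp_form_shadow_arity.py | first_depth_d_lattice
-- ===== SOURCE A (Python) =====
-- from typing import Any, Dict, List, Optional, Tuple
--
-- def dim_Mk(k: int) -> int:
--     r"""Dimension of M_k(SL(2,Z)) for even k >= 0.
--
--     Standard formula:
--       dim M_0 = 1
--       dim M_2 = 0
--       dim M_k = floor(k/12) + 1  if k mod 12 != 2
--       dim M_k = floor(k/12)      if k mod 12 == 2
--     """
--     if k < 0 or k % 2 != 0:
--         return 0
--     if k == 0:
--         return 1
--     if k == 2: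
--         return 0
--     if k % 12 == 2:
--         return k // 12
--     else:
--         return k // 12 + 1
--
-- def dim_Sk(k: int) -> int:
--     r"""Dimension of S_k(SL(2,Z)) for even k >= 0.
--
--     S_k = 0 for k < 12.
--     For k >= 12: dim S_k = dim M_k - 1.
--     """
--     if k < 12:
--         return 0
--     return dim_Mk(k) - 1
--
-- def first_depth_d_lattice(d: int) -> Optional[int]:
--     r"""Find the smallest rank of an even unimodular lattice with shadow depth d.
--
--     depth d = 3 + dim S_{r/2}.
--     So we need dim S_{r/2} = d - 3.
--     Find smallest even r divisible by 8 with dim S_{r/2} >= d - 3.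
--     """
--     target_g = d - 3
--     if target_g < 0:
--         return None
--     for r in range(8, 1000, 8):
--         k = r // 2
--         if dim_Sk(k) >= target_g:
--             return r
--     return None
-- ===== SOURCE B (Python) =====
-- def first_depth_d_lattice(d):
--     # Closed form: for r a multiple of 8, dim S_{r/2} = r // 24, so the
--     # smallest qualifying rank is 24*(d-3) (or 8 when d == 3), capped at 992.
--     target_g = d - 3
--     if target_g < 0:
--         return None
--     if target_g == 0:
--         return 8
--     r = 24 * target_g
--     return r if r <= 992 else None
-- ===== Notes on version B (the rewrite author's own statement) =====
-- stated objective: simpler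
-- what changed: B replaces the scan over range(8,1000,8) with helper dimension functions by an algebraic inversion of the dimension formula (dim S_{r/2} = r//24 for 8|r), returning 24*(d-3) (8 when d=3) capped at 992 with no loop and no helpers.
import Mathlib
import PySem

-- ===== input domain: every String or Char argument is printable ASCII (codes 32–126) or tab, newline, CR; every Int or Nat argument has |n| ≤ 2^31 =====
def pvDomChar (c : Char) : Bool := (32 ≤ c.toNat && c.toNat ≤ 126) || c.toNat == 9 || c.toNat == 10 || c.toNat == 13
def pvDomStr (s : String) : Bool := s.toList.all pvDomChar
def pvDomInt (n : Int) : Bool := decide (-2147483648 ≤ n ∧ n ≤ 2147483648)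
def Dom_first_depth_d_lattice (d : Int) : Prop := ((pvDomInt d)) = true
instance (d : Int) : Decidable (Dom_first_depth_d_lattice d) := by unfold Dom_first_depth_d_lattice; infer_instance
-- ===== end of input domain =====

-- B replaces A's scan over range(8,1000,8) by a closed-form inversion of the dimension formula (simpler).

-- ===== PORT A =====
def dim_Mk (k : Int) : Int :=
  if k < 0 ∨ PySem.Int.mod k 2 ≠ 0 then 0
  else if k = 0 then 1
  else if k = 2 then 0
  else if PySem.Int.mod k 12 = 2 then PySem.Int.floordiv k 12
  else PySem.Int.floordiv k 12 + 1

def dim_Sk (k : Int) : Int :=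
  if k < 12 then 0 else dim_Mk k - 1

def aLoop (g : Int) : List Int → Option Int
  | [] => none
  | r :: rs => if dim_Sk (PySem.Int.floordiv r 2) ≥ g then some r else aLoop g rs

def first_depth_d_lattice (d : Int) : Option Int :=
  let target_g := d - 3
  if target_g < 0 then none
  else aLoop target_g (PySem.List.pyRange 8 1000 8)

-- ===== PORT B =====
def first_depth_d_lattice_alt (d : Int) : Option Int :=
  let target_g := d - 3
  if target_g < 0 then none
  else if target_g = 0 then some 8
  else
    let r := 24 * target_g
    if r ≤ 992 then some r else none

-- ===== PRECONDITION & SPEC =====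
def Spec_first_depth_d_lattice (d : Int) (out : Option Int) : Prop := out = first_depth_d_lattice_alt d
instance (d : Int) (out : Option Int) : Decidable (Spec_first_depth_d_lattice d out) := by unfold Spec_first_depth_d_lattice; infer_instance

-- ===== CLAIM (what is proved, stated in full; the proofs are below) =====
def Claim_equal_first_depth_d_lattice : Prop := ∀ (d : Int), Dom_first_depth_d_lattice d → Spec_first_depth_d_lattice d (first_depth_d_lattice d)

-- ===== LEMMAS AND PROOFS =====

-- A's loop returns none when no element of the list qualifies.
theorem aLoop_none (g : Int) (l : List Int)
    (h : ∀ r ∈ l, dim_Sk (PySem.Int.floordiv r 2) < g) : aLoop g l = none := by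
  induction l with
  | nil => rfl
  | cons r rs ih =>
    simp only [aLoop]
    rw [if_neg, ih]
    · intro x hx; exact h x (List.mem_cons_of_mem _ hx)
    · exact not_le.mpr (h r (List.mem_cons_self ..))

-- Every rank in A's range has cusp-form dimension at most 41.
set_option maxRecDepth 4000 in
theorem range_dim_lt : ∀ r ∈ PySem.List.pyRange 8 1000 8, dim_Sk (PySem.Int.floordiv r 2) < 42 := by
  decide

theorem big_none (d : Int) (hd : 45 ≤ d) :
    first_depth_d_lattice d = first_depth_d_lattice_alt d := by
  unfold first_depth_d_lattice first_depth_d_lattice_alt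
  simp only []
  rw [if_neg (by omega), if_neg (by omega), if_neg (by omega), if_neg (by omega)]
  exact aLoop_none _ _ (fun r hr => lt_of_lt_of_le (range_dim_lt r hr) (by omega))

-- ===== VERDICT (by name: the statement is the Claim_ definition above) =====
theorem first_depth_d_lattice_spec : Claim_equal_first_depth_d_lattice := by
  intro d _
  unfold Spec_first_depth_d_lattice
  by_cases h1 : d < 3
  · unfold first_depth_d_lattice first_depth_d_lattice_alt
    rw [if_pos (by omega), if_pos (by omega)]
  · by_cases h2 : d ≤ 44
    · interval_cases d <;> decide
    · exact big_none d (by omega)
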